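-- pv_equiv track=rewrite | github.com/unk1nd0n3/bitbucket-creds-checker | truffleHog/truffleHog.py | get_strings_of_set
-- ===== SOURCE A (Python) =====
-- def get_strings_of_set(word, char_set, threshold=20):
--     count = 0
--     letters = ""
--     strings = []
--     for char in word:
--         if char in char_set:
--             letters += char
--             count += 1
--         else:
--             if count > threshold:
--                 strings.append(letters)
--             letters = ""
--             count = 0
--     if count > threshold:
--         strings.append(letters)
--     return strings
-- ===== SOURCE B (Python) =====
-- def get_strings_of_set(word, char_set, threshold=20):
--     # Split word at every char not in char_set (NUL sentinel cannot occur in the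
--     # printable-ASCII domain), then keep the pieces longer than threshold.
--     joined = "".join(c if c in char_set else "\x00" for c in word)
--     return [run for run in joined.split("\x00") if len(run) > threshold]
-- ===== Notes on version B (the rewrite author's own statement) =====
-- stated objective: simpler
-- what changed: Replaces A's in-loop count/letters state machine with its duplicated flush (inside the loop and again after it) by a two-phase split-then-filter pass: map non-member characters to a sentinel, split the string on it, and keep the pieces longer than threshold.
import Mathlib
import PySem

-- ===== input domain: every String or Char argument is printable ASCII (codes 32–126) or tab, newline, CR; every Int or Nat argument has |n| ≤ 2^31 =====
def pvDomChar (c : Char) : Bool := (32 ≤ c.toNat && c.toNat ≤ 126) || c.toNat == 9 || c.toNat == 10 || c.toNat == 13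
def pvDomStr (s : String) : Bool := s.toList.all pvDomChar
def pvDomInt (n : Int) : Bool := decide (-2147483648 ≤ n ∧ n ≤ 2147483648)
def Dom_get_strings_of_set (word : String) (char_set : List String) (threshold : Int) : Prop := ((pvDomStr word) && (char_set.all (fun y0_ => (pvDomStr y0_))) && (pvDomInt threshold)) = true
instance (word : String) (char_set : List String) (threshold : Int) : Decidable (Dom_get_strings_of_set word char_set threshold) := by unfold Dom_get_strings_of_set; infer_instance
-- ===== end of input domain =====

-- B replaces A's count/letters state machine with a split-then-filter pass
-- (non-member chars become a sentinel, split, keep pieces longer than threshold);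
-- objective: simpler. Equivalence is proved on the printable-ASCII domain.

-- `char in char_set` : membership of the one-char string among the list's strings
def pvMem (char_set : List String) (c : Char) : Bool := char_set.contains (String.ofList [c])

-- ===== PORT A =====
-- the for-loop of A, state = (count, letters, strings); letters kept as List Char
def pvLoopA (char_set : List String) (threshold : Int) :
    List Char → Int → List Char → List String → List String
  | [], count, letters, strings =>
      if count > threshold then strings ++ [String.ofList letters] else strings
  | c :: cs, count, letters, strings =>
      if pvMem char_set c then
        pvLoopA char_set threshold cs (count + 1) (letters ++ [c]) strings
      else
        pvLoopA char_set threshold cs 0 []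
          (if count > threshold then strings ++ [String.ofList letters] else strings)

def get_strings_of_set (word : String) (char_set : List String) (threshold : Int) : List String :=
  pvLoopA char_set threshold word.toList 0 [] []

-- ===== PORT B =====
-- joined = "".join(c if c in char_set else "\x00" for c in word); then split/filter
def get_strings_of_set_alt (word : String) (char_set : List String) (threshold : Int) : List String :=
  ((PySem.Chars.splitOn
      (word.toList.map (fun c => if pvMem char_set c then c else Char.ofNat 0))
      [Char.ofNat 0]).filter
    (fun run => (run.length : Int) > threshold)).map String.ofList

-- ===== PRECONDITION & SPEC =====
def Spec_get_strings_of_set (word : String) (char_set : List String) (threshold : Int) (out : List String) : Prop := out = get_strings_of_set_alt word char_set threshold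
instance (word : String) (char_set : List String) (threshold : Int) (out : List String) : Decidable (Spec_get_strings_of_set word char_set threshold out) := by unfold Spec_get_strings_of_set; infer_instance

-- ===== CLAIM (what is proved, stated in full; the proofs are below) =====
def Claim_equal_get_strings_of_set : Prop := ∀ (word : String) (char_set : List String) (threshold : Int), Dom_get_strings_of_set word char_set threshold → Spec_get_strings_of_set word char_set threshold (get_strings_of_set word char_set threshold)

-- ===== LEMMAS AND PROOFS =====

-- simple recursive characterisation of single-char split
def pvSplit (c0 : Char) : List Char → List (List Char)
  | [] => [[]]
  | c :: cs => if c = c0 then [] :: pvSplit c0 cs else (pvSplit c0 cs).modifyHead (c :: ·)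

theorem pvSplit_ne_nil (c0 : Char) (l : List Char) : pvSplit c0 l ≠ [] := by
  induction l with
  | nil => simp [pvSplit]
  | cons c cs ih =>
    simp only [pvSplit]
    split
    · simp
    · cases h : pvSplit c0 cs with
      | nil => exact absurd h ih
      | cons t ts => simp

theorem pvSplitOn_go_eq (c0 : Char) (fuel : Nat) (l cur : List Char) (acc : List (List Char))
    (hf : l.length ≤ fuel) :
    PySem.Chars.splitOn.go [c0] fuel l cur acc
      = acc.reverse ++ (pvSplit c0 l).modifyHead (cur.reverse ++ ·) := by
  induction fuel generalizing l cur acc with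
  | zero =>
    have : l = [] := by cases l <;> simp_all
    subst this
    simp [PySem.Chars.splitOn.go, pvSplit]
  | succ fuel ih =>
    cases l with
    | nil => simp [PySem.Chars.splitOn.go, pvSplit]
    | cons c cs =>
      simp only [PySem.Chars.splitOn.go]
      by_cases h : c0 = c
      · subst h
        have hp : [c0].isPrefixOf (c0 :: cs) = true := by simp [List.isPrefixOf]
        rw [if_pos hp]
        simp only [List.length_cons, List.length_nil, Nat.zero_add, List.drop_succ_cons,
          List.drop_zero]
        rw [ih cs [] (cur.reverse :: acc) (by simpa using Nat.le_of_succ_le_succ hf)]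
        simp only [pvSplit, List.reverse_cons, List.append_assoc,
          List.singleton_append, List.reverse_nil, List.modifyHead]
        cases pvSplit c0 cs <;> simp
      · have hp : [c0].isPrefixOf (c :: cs) = false := by
          simp [List.isPrefixOf]
          exact h
        rw [if_neg (by simp [hp])]
        rw [ih cs (c :: cur) acc (by simpa using Nat.le_of_succ_le_succ hf)]
        have hne : c ≠ c0 := fun hc => h hc.symm
        cases hs : pvSplit c0 cs with
        | nil => exact absurd hs (pvSplit_ne_nil c0 cs)
        | cons t ts => simp [pvSplit, hne, hs, List.modifyHead]

theorem pvSplitOn_eq (c0 : Char) (l : List Char) :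
    PySem.Chars.splitOn l [c0] = pvSplit c0 l := by
  have h := pvSplitOn_go_eq c0 (l.length + 1) l [] [] (Nat.le_succ _)
  rw [PySem.Chars.splitOn, h]
  cases hs : pvSplit c0 l with
  | nil => exact absurd hs (pvSplit_ne_nil c0 l)
  | cons t ts => simp

-- the central invariant: A's loop, started with a pending run `letters` of length
-- `count`, equals the filtered split of the rest prefixed by that pending run
theorem pvLoopA_eq_split (char_set : List String) (threshold : Int) (cs : List Char)
    (letters : List Char) (strings : List String)
    (hdom : ∀ c ∈ cs, pvDomChar c = true) :
    pvLoopA char_set threshold cs ((letters.length : Int)) letters strings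
      = strings ++ (((pvSplit (Char.ofNat 0)
            (cs.map (fun c => if pvMem char_set c then c else Char.ofNat 0))).modifyHead
              (letters ++ ·)).filter (fun run => (run.length : Int) > threshold)).map String.ofList := by
  induction cs generalizing letters strings with
  | nil =>
    simp only [List.map_nil, pvSplit, List.modifyHead, List.append_nil, pvLoopA]
    by_cases h : (letters.length : Int) > threshold
    · simp [h]
    · simp [h]
  | cons c cs ih =>
    have hc : pvDomChar c = true := hdom c (by simp)
    have hcs : ∀ x ∈ cs, pvDomChar x = true := fun x hx => hdom x (by simp [hx])
    simp only [List.map_cons, pvLoopA]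
    by_cases hm : pvMem char_set c = true
    · -- member: extend the pending run
      have hcne : c ≠ Char.ofNat 0 := by
        intro hcz
        rw [hcz] at hc
        simp [pvDomChar] at hc
      rw [if_pos hm]
      have hlen : (letters.length : Int) + 1 = (((letters ++ [c]).length : Int)) := by
        simp
      rw [hlen, ih (letters ++ [c]) strings hcs]
      rw [if_pos hm]
      congr 3
      simp only [pvSplit, if_neg hcne]
      cases hs : pvSplit (Char.ofNat 0)
          (cs.map (fun c => if pvMem char_set c then c else Char.ofNat 0)) with
      | nil => exact absurd hs (pvSplit_ne_nil _ _)
      | cons t ts => simp [List.modifyHead]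
    · -- non-member: flush the pending run
      rw [if_neg hm]
      have h0 : (0 : Int) = (([] : List Char).length : Int) := by simp
      rw [h0, ih [] _ hcs]
      rw [if_neg hm]
      have hmod : (pvSplit (Char.ofNat 0)
            (cs.map (fun c => if pvMem char_set c then c else Char.ofNat 0))).modifyHead
              (([] : List Char) ++ ·)
          = pvSplit (Char.ofNat 0) (cs.map (fun c => if pvMem char_set c then c else Char.ofNat 0)) := by
        cases hs : pvSplit (Char.ofNat 0)
            (cs.map (fun c => if pvMem char_set c then c else Char.ofNat 0)) with
        | nil => exact absurd hs (pvSplit_ne_nil _ _)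
        | cons t ts => simp
      rw [hmod]
      simp only [pvSplit, List.modifyHead]
      by_cases h : (letters.length : Int) > threshold
      · simp [h]
      · simp [h]

-- ===== VERDICT (by name: the statement is the Claim_ definition above) =====
theorem get_strings_of_set_spec : Claim_equal_get_strings_of_set := by
  intro word char_set threshold hdom
  unfold Spec_get_strings_of_set get_strings_of_set get_strings_of_set_alt
  have hchars : ∀ c ∈ word.toList, pvDomChar c = true := by
    unfold Dom_get_strings_of_set at hdom
    simp only [Bool.and_eq_true, pvDomStr, List.all_eq_true] at hdom
    exact fun c hc => hdom.1.1 c hc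
  have h0 : (0 : Int) = (([] : List Char).length : Int) := by simp
  rw [h0, pvLoopA_eq_split char_set threshold word.toList [] [] hchars]
  rw [pvSplitOn_eq]
  cases hs : pvSplit (Char.ofNat 0)
      (word.toList.map (fun c => if pvMem char_set c then c else Char.ofNat 0)) with
  | nil => exact absurd hs (pvSplit_ne_nil _ _)
  | cons t ts => simp
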